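-- pv_equiv track=rewrite | github.com/dvirsky/wme-sdk-python | example/demo/chart.py | format_nominee_text
-- ===== SOURCE A (Python) =====
-- def format_nominee_text(nominee):
--     words = nominee.split()
--     formatted = []
--     word_count = 0
--     for word in words:
--         if len(word) > 2:  # Only count words with more than two letters
--             word_count += 1
--         formatted.append(word)
--         if word_count == 2:  # After every second long word, insert a line break
--             formatted.append("\n")
--             word_count = 0
--     return " ".join(formatted).replace(" \n", "\n").replace("\n ", "\n")  # Clean up spaces around \n
-- ===== SOURCE B (Python) =====
-- def format_nominee_text(nominee):
--     words = nominee.split()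
--     # pass 1: determine the line lengths from the parity of the running long-word total
--     sizes = []
--     n = 0
--     longs = 0
--     for w in words:
--         n += 1
--         if len(w) > 2:
--             longs += 1
--             if longs % 2 == 0:
--                 sizes.append(n)
--                 n = 0
--     sizes.append(n)
--     # pass 2: cut the word list into chunks of those lengths and join
--     lines = []
--     rest = words
--     for k in sizes:
--         lines.append(" ".join(rest[:k]))
--         rest = rest[k:]
--     return "\n".join(lines)
-- ===== Notes on version B (the rewrite author's own statement) =====
-- stated objective: alternative
-- what changed: B is two staged passes: the first derives the list of line lengths from the parity of a monotone running long-word total (no counter reset, no line building), the second cuts the word list into chunks of those lengths with slices and joins them with newlines - replacing A's single pass that appends sentinel newline tokens and cleans up the joined string with two .replace passes.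
import Mathlib
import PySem

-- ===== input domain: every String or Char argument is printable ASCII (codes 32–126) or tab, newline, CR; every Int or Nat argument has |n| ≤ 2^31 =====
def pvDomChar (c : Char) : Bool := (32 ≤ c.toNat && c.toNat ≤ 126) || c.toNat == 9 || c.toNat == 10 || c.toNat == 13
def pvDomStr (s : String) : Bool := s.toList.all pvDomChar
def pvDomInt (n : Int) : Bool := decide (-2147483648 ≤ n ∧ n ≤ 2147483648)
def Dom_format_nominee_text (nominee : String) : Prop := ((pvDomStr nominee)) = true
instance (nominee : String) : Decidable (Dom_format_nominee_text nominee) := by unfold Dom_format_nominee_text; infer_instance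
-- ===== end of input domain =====

-- B replaces A's single pass (sentinel "\n" tokens cleaned up by two .replace passes) with two
-- staged passes: derive the line lengths from the parity of a monotone running long-word total,
-- then cut the word list into chunks of those lengths by slicing (objective: alternative).

-- ===== PORT A =====
def pvStepA (st : List String × Int) (word : String) : List String × Int :=
  let word_count := if PySem.Str.len word > 2 then st.2 + 1 else st.2
  let formatted := st.1 ++ [word]
  if word_count == 2 then (formatted ++ ["\n"], 0) else (formatted, word_count)

def format_nominee_text (nominee : String) : String :=
  let words := PySem.Str.split₀ nominee
  let st := words.foldl pvStepA ([], 0)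
  PySem.Str.replace (PySem.Str.replace (PySem.Str.join " " st.1) " \n" "\n") "\n " "\n"

-- ===== PORT B =====
-- pass 1 state: (n = words in the current chunk so far, longs = running long-word total, sizes)
def pvSizeStep (st : Int × Int × List Int) (w : String) : Int × Int × List Int :=
  let n := st.1 + 1
  if PySem.Str.len w > 2 then
    let longs := st.2.1 + 1
    if PySem.Int.mod longs 2 == 0 then (0, longs, st.2.2 ++ [n]) else (n, longs, st.2.2)
  else (n, st.2.1, st.2.2)

-- pass 2 state: (lines built so far, rest of the word list)
def pvCutStep (st : List String × List String) (k : Int) : List String × List String :=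
  (st.1 ++ [PySem.Str.join " " (PySem.List.slice st.2 none (some k))],
   PySem.List.slice st.2 (some k) none)

def format_nominee_text_alt (nominee : String) : String :=
  let words := PySem.Str.split₀ nominee
  let p1 := words.foldl pvSizeStep (0, 0, [])
  let sizes := p1.2.2 ++ [p1.1]
  let st := sizes.foldl pvCutStep ([], words)
  PySem.Str.join "\n" st.1

-- ===== PRECONDITION & SPEC =====
def Spec_format_nominee_text (nominee : String) (out : String) : Prop := out = format_nominee_text_alt nominee
instance (nominee : String) (out : String) : Decidable (Spec_format_nominee_text nominee out) := by unfold Spec_format_nominee_text; infer_instance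

-- ===== CLAIM (what is proved, stated in full; the proofs are below) =====
def Claim_equal_format_nominee_text : Prop := ∀ (nominee : String), Dom_format_nominee_text nominee → Spec_format_nominee_text nominee (format_nominee_text nominee)

-- ===== LEMMAS AND PROOFS =====
-- pvStepB is a PROOF-SIDE grouping loop (lines, current line, long-word count in the line);
-- A is reduced to it by pvLoop_inv, and both A and B are reduced to pvGroups below.
def pvStepB (st : List (List String) × List String × Int) (word : String) :
    List (List String) × List String × Int :=
  let count := if PySem.Str.len word > 2 then st.2.2 + 1 else st.2.2
  let current := st.2.1 ++ [word]
  if count == 2 then (st.1 ++ [current], [], 0) else (st.1, current, count)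

-- pvRep is the pure form of PySem.Chars.replace for a two-character pattern
def pvRep (x y z : Char) : List Char → List Char
  | [] => []
  | [c] => [c]
  | a :: b :: t => if a = x ∧ b = y then z :: pvRep x y z t else a :: pvRep x y z (b :: t)

lemma pvGo_eq (x y z : Char) : ∀ (fuel : Nat) (l acc : List Char), l.length ≤ fuel →
    PySem.Chars.replace.go [x, y] [z] fuel l acc = acc.reverse ++ pvRep x y z l := by
  intro fuel
  induction fuel with
  | zero =>
      intro l acc h
      have : l = [] := by cases l <;> simp_all
      subst this
      simp [PySem.Chars.replace.go, pvRep]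
  | succ n ih =>
      intro l acc h
      match l with
      | [] => simp [PySem.Chars.replace.go, pvRep]
      | [c] =>
          rw [PySem.Chars.replace.go]
          have hpre : [x, y].isPrefixOf [c] = false := by
            simp [List.isPrefixOf]
          rw [hpre]
          simp only [Bool.false_eq_true, if_false]
          rw [ih [] (c :: acc) (by simp)]
          simp [pvRep]
      | a :: b :: t =>
          rw [PySem.Chars.replace.go]
          by_cases hab : a = x ∧ b = y
          · have hpre : [x, y].isPrefixOf (a :: b :: t) = true := by
              simp [List.isPrefixOf, hab.1, hab.2]
            rw [hpre]
            simp only [if_true]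
            rw [show (a :: b :: t).drop [x,y].length = t by simp]
            rw [ih t ([z].reverse ++ acc) (by simp at h ⊢; omega)]
            have hstep : pvRep x y z (a :: b :: t) = z :: pvRep x y z t := by
              rw [pvRep, if_pos hab]
            rw [hstep]
            simp
          · have hpre : [x, y].isPrefixOf (a :: b :: t) = false := by
              simp [List.isPrefixOf]
              intro h1 h2
              exact hab ⟨h1.symm, h2.symm⟩
            rw [hpre]
            simp only [Bool.false_eq_true, if_false]
            rw [ih (b :: t) (a :: acc) (by simpa using Nat.le_of_succ_le_succ h)]
            have : pvRep x y z (a :: b :: t) = a :: pvRep x y z (b :: t) := by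
              rw [pvRep, if_neg hab]
            rw [this]
            simp

lemma pvReplace_eq_rep (x y z : Char) (s : List Char) :
    PySem.Chars.replace s [x, y] [z] = pvRep x y z s := by
  rw [PySem.Chars.replace]
  simp only [List.isEmpty_cons, Bool.false_eq_true, if_false]
  simpa using pvGo_eq x y z s.length s [] le_rfl

lemma pvRep_no_y (x y z : Char) (s : List Char) (h : y ∉ s) : pvRep x y z s = s := by
  induction s with
  | nil => rfl
  | cons a t ih =>
      match t with
      | [] => rfl
      | b :: t2 =>
          rw [pvRep, if_neg (by rintro ⟨-, rfl⟩; exact h (by simp))]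
          have ih' := ih (by intro hm; exact h (List.mem_cons_of_mem _ hm))
          rw [ih']

lemma pvRep_no_x (x y z : Char) (s : List Char) (h : x ∉ s) : pvRep x y z s = s := by
  induction s with
  | nil => rfl
  | cons a t ih =>
      match t with
      | [] => rfl
      | b :: t2 =>
          rw [pvRep, if_neg (by rintro ⟨rfl, -⟩; exact h (by simp))]
          have ih' := ih (by intro hm; exact h (List.mem_cons_of_mem _ hm))
          rw [ih']

lemma pvRep_end_x (x y z : Char) (a : List Char) (h : x ∉ a) :
    pvRep x y z (a ++ [x]) = a ++ [x] := by
  induction a with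
  | nil => rfl
  | cons c a' ih =>
      have hcx : c ≠ x := by rintro rfl; exact h (by simp)
      match a' with
      | [] => simp [pvRep, hcx]
      | c' :: a'' =>
          simp only [List.cons_append]
          rw [pvRep, if_neg (by rintro ⟨rfl, -⟩; exact hcx rfl)]
          have ih' := ih (by intro hm; exact h (List.mem_cons_of_mem _ hm))
          simp only [List.cons_append] at ih'
          rw [ih']

lemma pvRep_split_y (x y z : Char) (a b : List Char) (hxy : x ≠ y) (h : y ∉ a) :
    pvRep x y z (a ++ x :: y :: b) = a ++ z :: pvRep x y z b := by
  induction a with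
  | nil => simp [pvRep]
  | cons c a' ih =>
      have ih' := ih (by intro hm; exact h (List.mem_cons_of_mem _ hm))
      match a' with
      | [] =>
          rw [List.cons_append, List.nil_append, pvRep,
            if_neg (by rintro ⟨rfl, rfl⟩; exact hxy rfl)]
          rw [List.nil_append] at ih'
          rw [ih']
          simp
      | c' :: a'' =>
          have hcy : c' ≠ y := by rintro rfl; exact h (by simp)
          simp only [List.cons_append]
          rw [pvRep, if_neg (by rintro ⟨-, rfl⟩; exact hcy rfl)]
          rw [show (c' :: a'') ++ x :: y :: b = (c' :: a'') ++ x :: y :: b from rfl] at ih'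
          simp only [List.cons_append] at ih'
          rw [ih']

lemma pvRep_split_x (x y z : Char) (a b : List Char) (h : x ∉ a) :
    pvRep x y z (a ++ x :: y :: b) = a ++ z :: pvRep x y z b := by
  induction a with
  | nil => simp [pvRep]
  | cons c a' ih =>
      have hcx : c ≠ x := by rintro rfl; exact h (by simp)
      have ih' := ih (by intro hm; exact h (List.mem_cons_of_mem _ hm))
      match a' with
      | [] =>
          rw [List.cons_append, List.nil_append, pvRep,
            if_neg (by rintro ⟨rfl, -⟩; exact hcx rfl)]
          rw [List.nil_append] at ih'
          rw [ih']
          simp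
      | c' :: a'' =>
          simp only [List.cons_append]
          rw [pvRep, if_neg (by rintro ⟨rfl, -⟩; exact hcx rfl)]
          simp only [List.cons_append] at ih'
          rw [ih']

lemma pvIc_single (sep : List Char) (x : List Char) : List.intercalate sep [x] = x := by
  simp [List.intercalate]

lemma pvIc_cons2 (sep : List Char) (x y : List Char) (t : List (List Char)) :
    List.intercalate sep (x :: y :: t) = x ++ sep ++ List.intercalate sep (y :: t) := by
  simp [List.intercalate, List.intersperse]

lemma pvIc_append (sep : List Char) (xs ys : List (List Char)) (hx : xs ≠ []) (hy : ys ≠ []) :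
    List.intercalate sep (xs ++ ys) =
      List.intercalate sep xs ++ sep ++ List.intercalate sep ys := by
  induction xs with
  | nil => exact absurd rfl hx
  | cons x xs' ih =>
      match xs' with
      | [] =>
          match ys with
          | y :: ys' => simp [pvIc_cons2, pvIc_single]
      | x2 :: t =>
          have ih' := ih (by simp)
          simp only [List.cons_append] at ih' ⊢
          rw [pvIc_cons2, ih', pvIc_cons2]
          simp [List.append_assoc]

lemma pvNot_mem_ic (c : Char) (sep : List Char) (hs : c ∉ sep) :
    ∀ (ls : List (List Char)), (∀ w ∈ ls, c ∉ w) → c ∉ List.intercalate sep ls := by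
  intro ls
  induction ls with
  | nil => intro _; simp [List.intercalate]
  | cons w t ih =>
      intro h
      match t with
      | [] => simpa [pvIc_single] using h w (by simp)
      | w2 :: t2 =>
          rw [pvIc_cons2]
          intro hmem
          rcases List.mem_append.mp hmem with hmem | hmem
          · rcases List.mem_append.mp hmem with hmem | hmem
            · exact h w (by simp) hmem
            · exact hs hmem
          · exact ih (fun u hu => h u (List.mem_cons_of_mem _ hu)) hmem

def pvGoodW (w : List Char) : Prop := w ≠ [] ∧ ∀ ch ∈ w, PySem.Chars.isspace ch = false

lemma pvSplit_go_good : ∀ (s cur acc : _),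
    (∀ ch ∈ cur, PySem.Chars.isspace ch = false) → (∀ w ∈ acc, pvGoodW w) →
    ∀ w ∈ PySem.Chars.split₀.go s cur acc, pvGoodW w := by
  intro s
  induction s with
  | nil =>
      intro cur acc hcur hacc w hw
      rw [PySem.Chars.split₀.go] at hw
      by_cases hc : cur.isEmpty
      · rw [if_pos hc] at hw
        exact hacc w (List.mem_reverse.mp hw)
      · rw [if_neg hc] at hw
        rcases List.mem_cons.mp (List.mem_reverse.mp hw) with rfl | hw
        · exact ⟨by simpa using (List.isEmpty_eq_false_iff.mp (by simpa using hc)),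
            fun ch hch => hcur ch (List.mem_reverse.mp hch)⟩
        · exact hacc w hw
  | cons c rest ih =>
      intro cur acc hcur hacc w hw
      rw [PySem.Chars.split₀.go] at hw
      by_cases hsp : PySem.Chars.isspace c
      · rw [if_pos hsp] at hw
        by_cases hc : cur.isEmpty
        · rw [if_pos hc] at hw
          exact ih [] acc (by simp) hacc w hw
        · rw [if_neg hc] at hw
          refine ih [] (cur.reverse :: acc) (by simp) ?_ w hw
          intro u hu
          rcases List.mem_cons.mp hu with rfl | hu
          · exact ⟨by simpa using (List.isEmpty_eq_false_iff.mp (by simpa using hc)),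
              fun ch hch => hcur ch (List.mem_reverse.mp hch)⟩
          · exact hacc u hu
      · rw [if_neg hsp] at hw
        refine ih (c :: cur) acc ?_ hacc w hw
        intro ch hch
        rcases List.mem_cons.mp hch with rfl | hch
        · simpa using hsp
        · exact hcur ch hch

def pvJ (ls : List (List Char)) : List Char := List.intercalate [' '] ls

def pvFlatC (lines : List (List (List Char))) (cur : List (List Char)) : List (List Char) :=
  lines.flatMap (fun l => l ++ [['\n']]) ++ cur

def pvM : List (List (List Char)) → List (List Char) → List Char
  | [], cur => pvJ cur
  | l :: rest, cur =>
      pvJ l ++ '\n' :: (if rest = [] ∧ cur = [] then [] else ' ' :: pvM rest cur)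

def pvT (lines : List (List (List Char))) (cur : List (List Char)) : List Char :=
  List.intercalate ['\n'] ((lines ++ [cur]).map pvJ)

lemma pvFlatC_eq_nil (lines : List (List (List Char))) (cur : List (List Char)) :
    pvFlatC lines cur = [] ↔ lines = [] ∧ cur = [] := by
  cases lines <;> simp [pvFlatC]

lemma pvNl_not_in_J (ls : List (List Char)) (h : ∀ w ∈ ls, pvGoodW w) : '\n' ∉ pvJ ls := by
  refine pvNot_mem_ic '\n' [' '] (by decide) ls ?_
  intro w hw hmem
  have := (h w hw).2 '\n' hmem
  simp [PySem.Chars.isspace] at this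

lemma pvP1 : ∀ (lines : List (List (List Char))) (cur : List (List Char)),
    (∀ l ∈ lines, l ≠ [] ∧ ∀ w ∈ l, pvGoodW w) → (∀ w ∈ cur, pvGoodW w) →
    ∀ (p : List Char), '\n' ∉ p →
    pvRep ' ' '\n' '\n' (p ++ pvJ (pvFlatC lines cur)) = p ++ pvM lines cur := by
  intro lines
  induction lines with
  | nil =>
      intro cur hl hc p hp
      rw [pvRep_no_y _ _ _ _ (by
        intro hmem
        rcases List.mem_append.mp hmem with hmem | hmem
        · exact hp hmem
        · exact pvNl_not_in_J cur hc (by simpa [pvFlatC, pvJ] using hmem))]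
      simp [pvM, pvFlatC]
  | cons l rest ih =>
      intro cur hl hc p hp
      have hlgood := hl l (by simp)
      have hrest : ∀ l' ∈ rest, l' ≠ [] ∧ ∀ w ∈ l', pvGoodW w :=
        fun l' hl' => hl l' (List.mem_cons_of_mem _ hl')
      have hnlJl : '\n' ∉ pvJ l := pvNl_not_in_J l hlgood.2
      have hnlA : '\n' ∉ p ++ pvJ l := by
        intro hmem
        rcases List.mem_append.mp hmem with hmem | hmem
        · exact hp hmem
        · exact hnlJl hmem
      have hflat : pvFlatC (l :: rest) cur = l ++ (['\n'] :: pvFlatC rest cur) := by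
        simp [pvFlatC]
      by_cases hemp : rest = [] ∧ cur = []
      · have : pvFlatC rest cur = [] := (pvFlatC_eq_nil rest cur).mpr hemp
        rw [hflat, this, pvJ, pvIc_append [' '] l [['\n']] hlgood.1 (by simp), pvIc_single]
        rw [show p ++ (List.intercalate [' '] l ++ [' '] ++ ['\n']) =
          (p ++ pvJ l) ++ ' ' :: '\n' :: [] by simp [pvJ, List.append_assoc]]
        rw [pvRep_split_y _ _ _ _ _ (by decide) hnlA]
        simp [pvM, hemp.1, hemp.2, pvRep, List.append_assoc]
      · have hne : pvFlatC rest cur ≠ [] := by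
          intro h0; exact hemp ((pvFlatC_eq_nil rest cur).mp h0)
        match hFC : pvFlatC rest cur with
        | [] => exact absurd hFC hne
        | t :: ts =>
            rw [hflat, hFC, pvJ, pvIc_append [' '] l (['\n'] :: t :: ts) hlgood.1 (by simp),
              pvIc_cons2]
            rw [show p ++ (List.intercalate [' '] l ++ [' '] ++
                (['\n'] ++ [' '] ++ List.intercalate [' '] (t :: ts))) =
              (p ++ pvJ l) ++ ' ' :: '\n' :: ([' '] ++ List.intercalate [' '] (t :: ts)) by
                simp [pvJ, List.append_assoc]]
            rw [pvRep_split_y _ _ _ _ _ (by decide) hnlA]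
            have := ih cur hrest hc [' '] (by decide)
            rw [pvJ, hFC] at this
            rw [this]
            simp [pvM, hemp, List.append_assoc]

lemma pvP2 : ∀ (lines : List (List (List Char))) (cur : List (List Char)),
    (∀ l ∈ lines, l ≠ [] ∧ ∀ w ∈ l, pvGoodW w) → (∀ w ∈ cur, pvGoodW w) →
    ∀ (p : List Char), '\n' ∉ p →
    pvRep '\n' ' ' '\n' (p ++ pvM lines cur) = p ++ pvT lines cur := by
  intro lines
  induction lines with
  | nil =>
      intro cur hl hc p hp
      rw [pvM, pvRep_no_x _ _ _ _ (by
        intro hmem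
        rcases List.mem_append.mp hmem with hmem | hmem
        · exact hp hmem
        · exact pvNl_not_in_J cur hc hmem)]
      simp [pvT, pvIc_single]
  | cons l rest ih =>
      intro cur hl hc p hp
      have hlgood := hl l (by simp)
      have hrest : ∀ l' ∈ rest, l' ≠ [] ∧ ∀ w ∈ l', pvGoodW w :=
        fun l' hl' => hl l' (List.mem_cons_of_mem _ hl')
      have hnlA : '\n' ∉ p ++ pvJ l := by
        intro hmem
        rcases List.mem_append.mp hmem with hmem | hmem
        · exact hp hmem
        · exact pvNl_not_in_J l hlgood.2 hmem
      have hT : pvT (l :: rest) cur = pvJ l ++ ['\n'] ++ pvT rest cur := by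
        rw [pvT, List.cons_append, List.map_cons]
        have : (rest ++ [cur]).map pvJ ≠ [] := by simp
        match hm : (rest ++ [cur]).map pvJ with
        | [] => exact absurd hm this
        | u :: us => rw [pvIc_cons2, pvT, hm]
      by_cases hemp : rest = [] ∧ cur = []
      · rw [pvM, if_pos hemp]
        rw [show p ++ (pvJ l ++ ['\n']) = (p ++ pvJ l) ++ ['\n'] by simp [List.append_assoc]]
        rw [pvRep_end_x _ _ _ _ hnlA]
        rw [hT, hemp.1, hemp.2]
        simp [pvT, pvJ, List.intercalate, List.append_assoc]
      · rw [pvM, if_neg hemp]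
        rw [show p ++ (pvJ l ++ '\n' :: ' ' :: pvM rest cur) =
          (p ++ pvJ l) ++ '\n' :: ' ' :: pvM rest cur by simp [List.append_assoc]]
        rw [pvRep_split_x _ _ _ _ _ hnlA]
        have := ih cur hrest hc [] (by simp)
        rw [List.nil_append, List.nil_append] at this
        rw [this, hT]
        simp [List.append_assoc]

def pvFlatF (lines : List (List String)) (cur : List String) : List String :=
  lines.flatMap (fun l => l ++ ["\n"]) ++ cur

lemma pvLoop_inv : ∀ (ws : List String) (lines : List (List String)) (cur : List String) (c : Int),
    ws.foldl pvStepA (pvFlatF lines cur, c) =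
      (pvFlatF (ws.foldl pvStepB (lines, cur, c)).1 (ws.foldl pvStepB (lines, cur, c)).2.1,
        (ws.foldl pvStepB (lines, cur, c)).2.2) := by
  intro ws
  induction ws with
  | nil => intro lines cur c; rfl
  | cons w ws ih =>
      intro lines cur c
      rw [List.foldl_cons, List.foldl_cons]
      rw [show pvStepA (pvFlatF lines cur, c) w =
        (pvFlatF (pvStepB (lines, cur, c) w).1 (pvStepB (lines, cur, c) w).2.1,
          (pvStepB (lines, cur, c) w).2.2) from ?_]
      · exact ih _ _ _
      · rw [pvStepA, pvStepB]
        by_cases h2 : (if PySem.Str.len w > 2 then c + 1 else c) == 2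
        · simp only [h2, if_true]
          simp [pvFlatF, List.flatMap_append, List.append_assoc]
        · simp only [Bool.not_eq_true] at h2
          simp only [h2, Bool.false_eq_true, if_false]
          simp [pvFlatF, List.append_assoc]

lemma pvFold_good : ∀ (ws : List String) (lines : List (List String)) (cur : List String) (c : Int),
    (∀ w ∈ ws, pvGoodW w.toList) →
    (∀ l ∈ lines, l ≠ [] ∧ ∀ w ∈ l, pvGoodW w.toList) → (∀ w ∈ cur, pvGoodW w.toList) →
    (∀ l ∈ (ws.foldl pvStepB (lines, cur, c)).1, l ≠ [] ∧ ∀ w ∈ l, pvGoodW w.toList) ∧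
      (∀ w ∈ (ws.foldl pvStepB (lines, cur, c)).2.1, pvGoodW w.toList) := by
  intro ws
  induction ws with
  | nil => intro lines cur c _ h1 h2; exact ⟨h1, h2⟩
  | cons w ws ih =>
      intro lines cur c hw h1 h2
      have hwg : pvGoodW w.toList := hw w (by simp)
      have hws : ∀ u ∈ ws, pvGoodW u.toList := fun u hu => hw u (List.mem_cons_of_mem _ hu)
      rw [List.foldl_cons, pvStepB]
      by_cases hc2 : (if PySem.Str.len w > 2 then c + 1 else c) == 2
      · simp only [hc2, if_true]
        refine ih _ _ _ hws ?_ (by simp)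
        intro l hl
        rcases List.mem_append.mp hl with hl | hl
        · exact h1 l hl
        · rw [List.mem_singleton.mp hl]
          constructor
          · simp
          · intro u hu
            rcases List.mem_append.mp hu with hu | hu
            · exact h2 u hu
            · rw [List.mem_singleton.mp hu]; exact hwg
      · simp only [Bool.not_eq_true] at hc2
        simp only [hc2, Bool.false_eq_true, if_false]
        refine ih _ _ _ hws h1 ?_
        intro u hu
        rcases List.mem_append.mp hu with hu | hu
        · exact h2 u hu
        · rw [List.mem_singleton.mp hu]; exact hwg

-- A normalised: A's output is the grouping fold's lines and current line, joined by " " and "\n"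
set_option maxHeartbeats 2000000 in
lemma pvA_norm (nominee : String) :
    format_nominee_text nominee =
      PySem.Str.join "\n"
        ((((PySem.Str.split₀ nominee).foldl pvStepB ([], [], 0)).1 ++
            [((PySem.Str.split₀ nominee).foldl pvStepB ([], [], 0)).2.1]).map
          (fun line => PySem.Str.join " " line)) := by
  apply String.toList_inj.mp
  rw [format_nominee_text]
  set ws := PySem.Str.split₀ nominee with hws
  have hwords : ∀ w ∈ ws, pvGoodW w.toList := by
    intro w hw
    have hmem : w.toList ∈ PySem.Chars.split₀ nominee.toList := by
      rw [← PySem.Str.split₀_map_toList]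
      exact List.mem_map_of_mem hw
    rw [PySem.Chars.split₀] at hmem
    exact pvSplit_go_good nominee.toList [] [] (by simp) (by simp) _ hmem
  set r := ws.foldl pvStepB ([], [], 0) with hr
  have hinv := pvLoop_inv ws [] [] 0
  have hflat0 : pvFlatF [] [] = ([] : List String) := rfl
  rw [hflat0] at hinv
  have hgood := pvFold_good ws [] [] 0 hwords (by simp) (by simp)
  rw [← hr] at hinv hgood
  set L := r.1 with hL
  set C := r.2.1 with hC
  set LC := L.map (List.map String.toList) with hLC
  set CC := C.map String.toList with hCC
  have hLCgood : ∀ l ∈ LC, l ≠ [] ∧ ∀ w ∈ l, pvGoodW w := by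
    intro l hl
    rw [hLC] at hl
    obtain ⟨l', hl', rfl⟩ := List.mem_map.mp hl
    refine ⟨by simpa using (hgood.1 l' hl').1, ?_⟩
    intro w hw
    obtain ⟨w', hw', rfl⟩ := List.mem_map.mp hw
    exact (hgood.1 l' hl').2 w' hw'
  have hCCgood : ∀ w ∈ CC, pvGoodW w := by
    intro w hw
    obtain ⟨w', hw', rfl⟩ := List.mem_map.mp hw
    exact hgood.2 w' hw'
  -- A side
  rw [hinv]
  simp only [PySem.Str.toList_replace, PySem.Str.toList_join]
  rw [show (" " : String).toList = [' '] from rfl, show ("\n" : String).toList = ['\n'] from rfl,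
    show (" \n" : String).toList = [' ', '\n'] from rfl,
    show ("\n " : String).toList = ['\n', ' '] from rfl]
  rw [pvReplace_eq_rep, pvReplace_eq_rep]
  have hmapflat : (pvFlatF L C).map String.toList = pvFlatC LC CC := by
    simp [pvFlatF, pvFlatC, hLC, hCC, List.map_flatMap, List.flatMap_map]
  rw [hmapflat]
  have h1 := pvP1 LC CC hLCgood hCCgood [] (by simp)
  have h2 := pvP2 LC CC hLCgood hCCgood [] (by simp)
  simp only [List.nil_append] at h1 h2
  rw [show PySem.Chars.join [' '] (pvFlatC LC CC) = pvJ (pvFlatC LC CC) from rfl, h1, h2]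
  -- right-hand side
  rw [show PySem.Chars.join ['\n'] (((L ++ [C]).map fun line => PySem.Str.join " " line).map
      String.toList) = pvT LC CC from ?_]
  rw [pvT]
  congr 1
  rw [List.map_map, hLC, hCC]
  simp only [List.map_append, List.map_map, List.map_cons, List.map_nil]
  congr 1
  · ext l
    simp [Function.comp, PySem.Str.toList_join, pvJ, PySem.Chars.join]
  · simp [Function.comp, PySem.Str.toList_join, pvJ, PySem.Chars.join]

-- pvGroups ws c: the lines the grouping produces, recursively (c = long words in the open line)
def pvGroups : List String → Int → List (List String)
  | [], _ => [[]]
  | w :: t, c =>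
    let c' := if PySem.Str.len w > 2 then c + 1 else c
    if c' = 2 then [w] :: pvGroups t 0
    else
      match pvGroups t c' with
      | [] => [[w]]
      | g :: gs => (w :: g) :: gs

lemma pvGroups_cons_eq2 (w : String) (t : List String) (c : Int)
    (h : (if PySem.Str.len w > 2 then c + 1 else c) = 2) :
    pvGroups (w :: t) c = [w] :: pvGroups t 0 := by
  rw [pvGroups]
  rw [if_pos h]

lemma pvGroups_cons_ne2 (w : String) (t : List String) (c : Int)
    (h : ¬ (if PySem.Str.len w > 2 then c + 1 else c) = 2)
    (g : List String) (gs : List (List String))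
    (hg : pvGroups t (if PySem.Str.len w > 2 then c + 1 else c) = g :: gs) :
    pvGroups (w :: t) c = (w :: g) :: gs := by
  rw [pvGroups]
  rw [if_neg h, hg]

lemma pvGroups_ne_nil : ∀ (ws : List String) (c : Int), pvGroups ws c ≠ [] := by
  intro ws c
  cases ws with
  | nil => simp [pvGroups]
  | cons w t =>
      by_cases h : (if PySem.Str.len w > 2 then c + 1 else c) = 2
      · rw [pvGroups_cons_eq2 w t c h]; simp
      · cases hg : pvGroups t (if PySem.Str.len w > 2 then c + 1 else c) with
        | nil => rw [pvGroups, if_neg h, hg]; simp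
        | cons g gs => rw [pvGroups_cons_ne2 w t c h g gs hg]; simp

def pvConsApp (cur : List String) : List (List String) → List (List String)
  | [] => [cur]
  | g :: gs => (cur ++ g) :: gs

lemma pvFoldB_eq_groups : ∀ (ws : List String) (lines : List (List String)) (cur : List String)
    (c : Int),
    (ws.foldl pvStepB (lines, cur, c)).1 ++ [(ws.foldl pvStepB (lines, cur, c)).2.1] =
      lines ++ pvConsApp cur (pvGroups ws c) := by
  intro ws
  induction ws with
  | nil => intro lines cur c; simp [pvGroups, pvConsApp]
  | cons w t ih =>
      intro lines cur c
      rw [List.foldl_cons, pvStepB]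
      by_cases h2 : (if PySem.Str.len w > 2 then c + 1 else c) = 2
      · simp only [h2, beq_self_eq_true, if_true]
        rw [ih, pvGroups_cons_eq2 w t c h2]
        cases hg : pvGroups t 0 with
        | nil => exact absurd hg (pvGroups_ne_nil t 0)
        | cons g gs => simp [pvConsApp, List.append_assoc]
      · have hb : ((if PySem.Str.len w > 2 then c + 1 else c) == 2) = false := by
          simpa using h2
        simp only [hb, Bool.false_eq_true, if_false]
        rw [ih]
        cases hg : pvGroups t (if PySem.Str.len w > 2 then c + 1 else c) with
        | nil => exact absurd hg (pvGroups_ne_nil t _)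
        | cons g gs =>
            rw [pvGroups_cons_ne2 w t c h2 g gs hg]
            simp [pvConsApp, List.append_assoc]

lemma pvGroups_flatten : ∀ (ws : List String) (c : Int), (pvGroups ws c).flatten = ws := by
  intro ws
  induction ws with
  | nil => intro c; simp [pvGroups]
  | cons w t ih =>
      intro c
      by_cases h : (if PySem.Str.len w > 2 then c + 1 else c) = 2
      · rw [pvGroups_cons_eq2 w t c h]
        simp [ih 0]
      · cases hg : pvGroups t (if PySem.Str.len w > 2 then c + 1 else c) with
        | nil => exact absurd hg (pvGroups_ne_nil t _)
        | cons g gs =>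
            rw [pvGroups_cons_ne2 w t c h g gs hg]
            have hft := ih (if PySem.Str.len w > 2 then c + 1 else c)
            rw [hg] at hft
            simp only [List.flatten_cons, List.cons_append] at hft ⊢
            rw [hft]

def pvHeadAdd (n : Int) : List Int → List Int
  | [] => [n]
  | x :: xs => (n + x) :: xs

lemma pvHeadAdd_zero (l : List Int) (h : l ≠ []) : pvHeadAdd 0 l = l := by
  match l with
  | [] => exact absurd rfl h
  | x :: xs => simp [pvHeadAdd]

-- pass 1 computes exactly the lengths of pvGroups' lines
lemma pvSizes_eq_groups : ∀ (ws : List String) (n longs : Int) (acc : List Int),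
    (ws.foldl pvSizeStep (n, longs, acc)).2.2 ++ [(ws.foldl pvSizeStep (n, longs, acc)).1] =
      acc ++ pvHeadAdd n ((pvGroups ws (longs % 2)).map (fun g => (g.length : Int))) := by
  intro ws
  induction ws with
  | nil => intro n longs acc; simp [pvGroups, pvHeadAdd]
  | cons w t ih =>
      intro n longs acc
      rw [List.foldl_cons]
      by_cases hlong : PySem.Str.len w > 2
      · by_cases he : (longs + 1) % 2 = 0
        · have hstep : pvSizeStep (n, longs, acc) w = (0, longs + 1, acc ++ [n + 1]) := by
            rw [pvSizeStep]
            simp only [hlong, if_true]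
            rw [PySem.Int.mod_eq_emod_of_pos (by norm_num : (0:Int) < 2)]
            simp [he]
          rw [hstep, ih 0 (longs + 1) (acc ++ [n + 1]), he]
          have hc2 : (if PySem.Str.len w > 2 then longs % 2 + 1 else longs % 2) = 2 := by
            rw [if_pos hlong]; omega
          rw [pvGroups_cons_eq2 w t (longs % 2) hc2]
          rw [pvHeadAdd_zero _ (by
            intro hnil
            exact pvGroups_ne_nil t 0 (List.map_eq_nil_iff.mp hnil))]
          simp [pvHeadAdd, List.append_assoc]
        · have hstep : pvSizeStep (n, longs, acc) w = (n + 1, longs + 1, acc) := by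
            rw [pvSizeStep]
            simp only [hlong, if_true]
            rw [PySem.Int.mod_eq_emod_of_pos (by norm_num : (0:Int) < 2)]
            simp [he]
          rw [hstep, ih (n + 1) (longs + 1) acc]
          have hp : (longs + 1) % 2 = longs % 2 + 1 := by omega
          rw [hp]
          have hc2 : ¬ (if PySem.Str.len w > 2 then longs % 2 + 1 else longs % 2) = 2 := by
            rw [if_pos hlong]; omega
          cases hg : pvGroups t (longs % 2 + 1) with
          | nil => exact absurd hg (pvGroups_ne_nil t _)
          | cons g gs =>
              rw [pvGroups_cons_ne2 w t (longs % 2) hc2 g gs (by rw [if_pos hlong]; exact hg)]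
              simp only [List.map_cons, pvHeadAdd, List.length_cons]
              congr 2
              push_cast
              ring
      · have hstep : pvSizeStep (n, longs, acc) w = (n + 1, longs, acc) := by
          rw [pvSizeStep, if_neg hlong]
        rw [hstep, ih (n + 1) longs acc]
        have hc2 : ¬ (if PySem.Str.len w > 2 then longs % 2 + 1 else longs % 2) = 2 := by
          rw [if_neg hlong]; omega
        cases hg : pvGroups t (longs % 2) with
        | nil => exact absurd hg (pvGroups_ne_nil t _)
        | cons g gs =>
            rw [pvGroups_cons_ne2 w t (longs % 2) hc2 g gs (by rw [if_neg hlong]; exact hg)]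
            simp only [List.map_cons, pvHeadAdd, List.length_cons]
            congr 2
            push_cast
            ring

-- pass 2 cuts the flattened groups back into the groups
lemma pvCut_eq_groups : ∀ (gs : List (List String)) (lines : List String),
    ((gs.map (fun g => (g.length : Int))).foldl pvCutStep (lines, gs.flatten)).1 =
      lines ++ gs.map (fun g => PySem.Str.join " " g) := by
  intro gs
  induction gs with
  | nil => intro lines; simp
  | cons g gs ih =>
      intro lines
      rw [List.map_cons, List.foldl_cons, List.flatten_cons]
      rw [show pvCutStep (lines, g ++ gs.flatten) (g.length : Int) =
        (lines ++ [PySem.Str.join " " g], gs.flatten) from ?_]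
      · rw [ih]
        simp [List.append_assoc]
      · rw [pvCutStep]
        rw [PySem.List.slice_to_natCast, PySem.List.slice_from_natCast]
        rw [List.take_left, List.drop_left]

set_option maxHeartbeats 1000000 in
lemma pvMain (nominee : String) :
    format_nominee_text nominee = format_nominee_text_alt nominee := by
  rw [pvA_norm, format_nominee_text_alt]
  set ws := PySem.Str.split₀ nominee with hws
  have hG := pvFoldB_eq_groups ws [] [] 0
  have hgne := pvGroups_ne_nil ws 0
  have hG' : (ws.foldl pvStepB ([], [], 0)).1 ++ [(ws.foldl pvStepB ([], [], 0)).2.1] =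
      pvGroups ws 0 := by
    rw [hG]
    match hg : pvGroups ws 0 with
    | [] => exact absurd hg hgne
    | g :: gs => simp [pvConsApp]
  rw [hG']
  have hS := pvSizes_eq_groups ws 0 0 []
  simp only [List.nil_append] at hS
  have h02 : ((0 : Int) % 2) = 0 := by norm_num
  rw [h02] at hS
  rw [pvHeadAdd_zero _ (by
    intro hnil
    exact hgne (List.map_eq_nil_iff.mp hnil)) ] at hS
  rw [hS]
  have hflat : ws = (pvGroups ws 0).flatten := (pvGroups_flatten ws 0).symm
  rw [show ((pvGroups ws 0).map (fun g => (g.length : Int))).foldl pvCutStep ([], ws) =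
      ((pvGroups ws 0).map (fun g => (g.length : Int))).foldl pvCutStep
        ([], (pvGroups ws 0).flatten) by rw [← hflat]]
  rw [pvCut_eq_groups (pvGroups ws 0) []]
  simp

-- ===== VERDICT (by name: the statement is the Claim_ definition above) =====
theorem format_nominee_text_spec : Claim_equal_format_nominee_text := by
  intro nominee _
  unfold Spec_format_nominee_text
  exact pvMain nominee
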